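-- pv_equiv track=rewrite | github.com/wg-lux/endoreg-db | endoreg_db/models/metadata/sensitive_meta_logic.py | _map_gender_string_to_standard
-- ===== SOURCE A (Python) =====
-- from typing import TYPE_CHECKING, Dict, Any, Optional, Type
--
-- def _map_gender_string_to_standard(gender_str: str) -> Optional[str]:
--     """Maps various gender string inputs to standard gender names used in the DB."""
--     mapping = {
--         'male': ['male', 'm', 'männlich', 'man'],
--         'female': ['female', 'f', 'weiblich', 'woman'],
--         'unknown': ['unknown', 'unbekannt', 'other', 'diverse', '']
--     }
--     gender_lower = gender_str.strip().lower()
--     for standard, variants in mapping.items():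
--         if gender_lower in variants:
--             return standard
--     return None
-- ===== SOURCE B (Python) =====
-- from typing import Optional
--
-- _GENDER_LOOKUP = {
--     'male': 'male', 'm': 'male', 'männlich': 'male', 'man': 'male',
--     'female': 'female', 'f': 'female', 'weiblich': 'female', 'woman': 'female',
--     'unknown': 'unknown', 'unbekannt': 'unknown', 'other': 'unknown',
--     'diverse': 'unknown', '': 'unknown',
-- }
--
-- def _map_gender_string_to_standard(gender_str: str) -> Optional[str]:
--     """Maps various gender string inputs to standard gender names used in the DB."""
--     return _GENDER_LOOKUP.get(gender_str.strip().lower())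
-- ===== Notes on version B (the rewrite author's own statement) =====
-- stated objective: idiomatic
-- what changed: Replaced the loop over a standard->variants mapping with list-membership tests by a single flat variant->standard dict built once at module level and one .get lookup.
import Mathlib
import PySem

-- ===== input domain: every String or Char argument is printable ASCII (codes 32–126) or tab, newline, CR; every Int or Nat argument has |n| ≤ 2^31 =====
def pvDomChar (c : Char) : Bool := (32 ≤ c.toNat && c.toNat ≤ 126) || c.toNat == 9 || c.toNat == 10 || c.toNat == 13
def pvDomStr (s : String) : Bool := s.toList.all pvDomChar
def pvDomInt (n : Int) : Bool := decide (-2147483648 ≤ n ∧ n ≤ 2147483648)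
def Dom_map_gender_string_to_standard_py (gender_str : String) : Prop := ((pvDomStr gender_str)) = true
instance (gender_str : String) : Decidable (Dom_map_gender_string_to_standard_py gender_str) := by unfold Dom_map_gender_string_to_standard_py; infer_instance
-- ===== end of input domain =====

-- B replaces A's loop over standard->variants lists by a flat variant->standard dict and one lookup (idiomatic).

-- ===== PORT A =====
-- the 'for standard, variants in mapping.items(): if gender_lower in variants: return standard' loop
def pvLoopA (gl : String) : List (String × List String) → Option String
  | [] => none
  | (standard, variants) :: rest =>
      if gl ∈ variants then some standard else pvLoopA gl rest

def map_gender_string_to_standard_py (gender_str : String) : Option String :=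
  let mapping : List (String × List String) :=
    [("male", ["male", "m", "männlich", "man"]),
     ("female", ["female", "f", "weiblich", "woman"]),
     ("unknown", ["unknown", "unbekannt", "other", "diverse", ""])]
  let gender_lower := PySem.Str.lower (PySem.Str.strip gender_str)
  pvLoopA gender_lower mapping

-- ===== PORT B =====
def pvGenderLookup : PySem.Dict String String :=
  PySem.Dict.mk  -- literal dict; keys are distinct
    [("male", "male"), ("m", "male"), ("männlich", "male"), ("man", "male"),
     ("female", "female"), ("f", "female"), ("weiblich", "female"), ("woman", "female"),
     ("unknown", "unknown"), ("unbekannt", "unknown"), ("other", "unknown"),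
     ("diverse", "unknown"), ("", "unknown")]

def map_gender_string_to_standard_py_alt (gender_str : String) : Option String :=
  pvGenderLookup.get? (PySem.Str.lower (PySem.Str.strip gender_str))

-- ===== PRECONDITION & SPEC =====
def Spec_map_gender_string_to_standard_py (gender_str : String) (out : Option String) : Prop := out = map_gender_string_to_standard_py_alt gender_str
instance (gender_str : String) (out : Option String) : Decidable (Spec_map_gender_string_to_standard_py gender_str out) := by unfold Spec_map_gender_string_to_standard_py; infer_instance

-- ===== CLAIM (what is proved, stated in full; the proofs are below) =====
def Claim_equal_map_gender_string_to_standard_py : Prop := ∀ (gender_str : String), Dom_map_gender_string_to_standard_py gender_str → Spec_map_gender_string_to_standard_py gender_str (map_gender_string_to_standard_py gender_str)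

-- ===== LEMMAS AND PROOFS =====
-- both ports are the same function of the normalised key
lemma pv_core (k : String) :
    pvLoopA k
      [("male", ["male", "m", "männlich", "man"]),
       ("female", ["female", "f", "weiblich", "woman"]),
       ("unknown", ["unknown", "unbekannt", "other", "diverse", ""])]
      = pvGenderLookup.get? k := by
  simp only [pvLoopA, pvGenderLookup, List.mem_cons, List.not_mem_nil, or_false]
  split_ifs with h1 h2 h3
  · rcases h1 with h | h | h | h <;> subst h <;> rfl
  · rcases h2 with h | h | h | h <;> subst h <;> rfl
  · rcases h3 with h | h | h | h | h <;> subst h <;> rfl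
  · push Not at h1 h2 h3
    simp [PySem.Dict.get?_mk_cons, Ne.symm h1.1, Ne.symm h1.2.1, Ne.symm h1.2.2.1,
      Ne.symm h1.2.2.2, Ne.symm h2.1, Ne.symm h2.2.1, Ne.symm h2.2.2.1, Ne.symm h2.2.2.2,
      Ne.symm h3.1, Ne.symm h3.2.1, Ne.symm h3.2.2.1, Ne.symm h3.2.2.2.1, Ne.symm h3.2.2.2.2]
    rfl

-- ===== VERDICT (by name: the statement is the Claim_ definition above) =====
theorem map_gender_string_to_standard_py_spec : Claim_equal_map_gender_string_to_standard_py := by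
  intro s _
  unfold Spec_map_gender_string_to_standard_py map_gender_string_to_standard_py
    map_gender_string_to_standard_py_alt
  exact pv_core _
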